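-- pv_equiv track=rewrite | github.com/raamkashyap/InterviewBit | Arrays/PerfectPeakofArray.py | perfectPeak
-- ===== SOURCE A (Python) =====
-- def perfectPeak(A):
--     n = len(A)
--     left = [0]*n
--     right = [0]*n
--     left[0] = A[0]
--     right[n-1] = A[n-1]
--     for i in range(1,n):
--         left[i] = max(left[i-1],A[i])
--     for i in range(n-2,-1,-1):
--         right[i] = min(right[i+1],A[i])
--
--     # print left
--     # print "hello"
--     # print right
--     for i in range(1,n-1):
--         if(A[i] > left[i-1] and A[i] < right[i+1]):
--             return 1
--     return 0
-- ===== SOURCE B (Python) =====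
-- def perfectPeak(A):
--     # Single forward pass, O(1) extra space: keep a running prefix max and the
--     # earliest prefix-record candidate that no later element has invalidated.
--     n = len(A)
--     running = A[0]
--     cand = None
--     for i in range(1, n):
--         x = A[i]
--         if cand is not None and x <= cand:
--             cand = None
--         if cand is None and i <= n - 2 and x > running:
--             cand = x
--         if x > running:
--             running = x
--     return 1 if cand is not None else 0
-- ===== Notes on version B (the rewrite author's own statement) =====
-- stated objective: faster
-- what changed: Replaces A's three staged passes over prefix-max and suffix-min arrays with one forward pass in O(1) extra space that tracks a running max and the earliest still-surviving prefix-record candidate (prefix records increase, so an element invalidating the earliest candidate invalidates all later ones).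
import Mathlib
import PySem

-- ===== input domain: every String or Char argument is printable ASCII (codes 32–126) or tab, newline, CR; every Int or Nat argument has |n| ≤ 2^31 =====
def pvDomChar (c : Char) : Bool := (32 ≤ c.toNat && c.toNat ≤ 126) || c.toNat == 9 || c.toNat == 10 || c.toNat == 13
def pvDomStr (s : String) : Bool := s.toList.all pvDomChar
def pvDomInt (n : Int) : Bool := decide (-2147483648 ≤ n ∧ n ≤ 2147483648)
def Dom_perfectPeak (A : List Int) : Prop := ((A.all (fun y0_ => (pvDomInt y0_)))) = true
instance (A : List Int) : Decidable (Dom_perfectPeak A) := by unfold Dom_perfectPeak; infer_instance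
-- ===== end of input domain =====

-- B replaces A's three passes and two auxiliary arrays with a single forward pass in
-- O(1) extra space maintaining a running max and one surviving candidate.

-- ===== PORT A =====
-- for i in range(1,n): left[i] = max(left[i-1], A[i])
def pvLeftLoop (A : List Int) (left : List Int) (i : Nat) : List Int :=
  if i < A.length then
    pvLeftLoop A (left.set i (max (left.getD (i - 1) 0) (A.getD i 0))) (i + 1)
  else left
termination_by A.length - i

-- for i in range(n-2,-1,-1): right[i] = min(right[i+1], A[i]); called with k = n-1
-- (k counts the remaining iterations; the index processed at step k+1 is k)
def pvRightLoopA (A : List Int) (right : List Int) : Nat → List Int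
  | 0 => right
  | k + 1 => pvRightLoopA A (right.set k (min (right.getD (k + 1) 0) (A.getD k 0))) k

-- for i in range(1,n-1): if A[i] > left[i-1] and A[i] < right[i+1]: return 1 / return 0
def pvScanA (A left right : List Int) (i : Nat) : Int :=
  if i < A.length - 1 then
    if A.getD i 0 > left.getD (i - 1) 0 ∧ A.getD i 0 < right.getD (i + 1) 0 then 1
    else pvScanA A left right (i + 1)
  else 0
termination_by A.length - 1 - i

def perfectPeak (A : List Int) : Int :=
  let n := A.length
  let left := pvLeftLoop A ((List.replicate n 0).set 0 (A.getD 0 0)) 1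
  let right := pvRightLoopA A ((List.replicate n 0).set (n - 1) (A.getD (n - 1) 0)) (n - 1)
  pvScanA A left right 1

-- ===== PORT B =====
-- Source B's single loop: state (running, cand); kill the candidate if x <= cand,
-- adopt x as candidate if none is alive, i <= n-2 and x > running, then bump running.
def pvKill (x : Int) : Option Int → Option Int
  | some c => if x ≤ c then none else some c
  | none => none

def pvLoopB (A : List Int) (running : Int) (cand : Option Int) (i : Nat) : Option Int :=
  if i < A.length then
    pvLoopB A (max running (A.getD i 0))
      (if pvKill (A.getD i 0) cand = none ∧ i ≤ A.length - 2 ∧ running < A.getD i 0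
       then some (A.getD i 0) else pvKill (A.getD i 0) cand)
      (i + 1)
  else cand
termination_by A.length - i

def perfectPeak_alt (A : List Int) : Int :=
  match pvLoopB A (A.getD 0 0) none 1 with
  | some _ => 1
  | none => 0

-- ===== PRECONDITION & SPEC =====
-- Python A raises IndexError (A[0]) exactly on the empty list; Pre_ excludes only that.
def Pre_perfectPeak (A : List Int) : Prop := A ≠ []
instance (A : List Int) : Decidable (Pre_perfectPeak A) := by unfold Pre_perfectPeak; infer_instance

def pvWitness_perfectPeak : List Int := [1, 3, 2]

def Spec_perfectPeak (A : List Int) (out : Int) : Prop := out = perfectPeak_alt A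
instance (A : List Int) (out : Int) : Decidable (Spec_perfectPeak A out) := by unfold Spec_perfectPeak; infer_instance

-- ===== CLAIM =====
def Claim_equal_perfectPeak : Prop := ∀ (A : List Int), Dom_perfectPeak A → Pre_perfectPeak A → Spec_perfectPeak A (perfectPeak A)

-- ===== LEMMAS AND PROOFS =====

-- k is a "survivor at time i": an interior prefix record not invalidated by A[k+1..i-1]
def pvSurv (A : List Int) (i k : Nat) : Prop :=
  1 ≤ k ∧ k + 1 < A.length ∧ k < i ∧
  (∀ j, j < k → A.getD j 0 < A.getD k 0) ∧
  (∀ j, k < j → j < i → A.getD k 0 < A.getD j 0)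

lemma surv_weaken (A : List Int) (i k : Nat) (h : pvSurv A (i + 1) k) (hk : k < i) :
    pvSurv A i k :=
  ⟨h.1, h.2.1, hk, h.2.2.2.1, fun j hj hj' => h.2.2.2.2 j hj (by omega)⟩

-- the single pass returns a live candidate iff some interior index survives to the end
lemma loopB_iff (A : List Int) :
    ∀ (i : Nat) (running : Int) (cand : Option Int), 1 ≤ i → i ≤ A.length →
    (∀ x, running < x ↔ ∀ j, j < i → A.getD j 0 < x) →
    (cand = none → ∀ k, ¬ pvSurv A i k) →
    (∀ c, cand = some c → (∃ k, pvSurv A i k ∧ A.getD k 0 = c) ∧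
        ∀ k, pvSurv A i k → c ≤ A.getD k 0) →
    ((pvLoopB A running cand i).isSome ↔ ∃ k, pvSurv A A.length k) := by
  intro i
  induction h : A.length - i generalizing i with
  | zero =>
    intro running cand h1 hle hrun hnone hsome
    have hni : i = A.length := by omega
    rw [pvLoopB]
    have hno : ¬ i < A.length := by omega
    simp only [if_neg hno]
    constructor
    · intro hs
      match cand, hs with
      | some c, _ =>
        obtain ⟨⟨k, hk, _⟩, _⟩ := hsome c rfl
        exact ⟨k, hni ▸ hk⟩
    · rintro ⟨k, hk⟩
      cases cand with
      | some c => rfl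
      | none => exact absurd (hni ▸ hk) (hnone rfl k)
  | succ m ih =>
    intro running cand h1 hle hrun hnone hsome
    have hilt : i < A.length := by omega
    rw [pvLoopB]
    simp only [if_pos hilt]
    have hrun' : ∀ y, max running (A.getD i 0) < y ↔ ∀ j, j < i + 1 → A.getD j 0 < y := by
      intro y
      rw [max_lt_iff, hrun]
      constructor
      · rintro ⟨hall, hxy⟩ j hj
        rcases Nat.lt_succ_iff_lt_or_eq.mp hj with hj | hj
        · exact hall j hj
        · exact hj ▸ hxy
      · intro hall
        exact ⟨fun j hj => hall j (by omega), hall i (by omega)⟩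
    cases cand with
    | none =>
      simp only [pvKill]
      by_cases hP : i ≤ A.length - 2 ∧ running < A.getD i 0
      · rw [if_pos (by tauto)]
        refine ih (i + 1) (by omega) _ _ (by omega) hilt hrun' (by simp) ?_
        intro c hc
        have hcx : c = A.getD i 0 := by injection hc; omega
        subst hcx
        have hnone' : ∀ k, k < i + 1 → k ≠ i → ¬ pvSurv A (i + 1) k := by
          intro k hk hne hkS
          exact hnone rfl k (surv_weaken A i k hkS (by omega))
        constructor
        · exact ⟨i, ⟨by omega, by omega, by omega,
            fun j hj => (hrun _).mp hP.2 j hj, by omega⟩, rfl⟩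
        · intro k hkS
          have hk_lt : k < i + 1 := hkS.2.2.1
          by_cases hki : k = i
          · subst hki; exact le_refl _
          · exact absurd hkS (hnone' k hk_lt hki)
      · rw [if_neg (by tauto)]
        refine ih (i + 1) (by omega) _ _ (by omega) hilt hrun' ?_ (by simp)
        intro _ k hkS
        have hk_lt : k < i + 1 := hkS.2.2.1
        by_cases hki : k = i
        · subst hki
          exact hP ⟨by have := hkS.2.1; omega, (hrun _).mpr hkS.2.2.2.1⟩
        · exact hnone rfl k (surv_weaken A i k hkS (by omega))
    | some c =>
      obtain ⟨⟨k0, hk0S, hk0v⟩, hmin⟩ := hsome c rfl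
      have hk0i : k0 < i := hk0S.2.2.1
      have hcrun : ¬ running < c := by
        rw [hrun]
        intro hall
        exact absurd (hk0v ▸ hall k0 hk0S.2.2.1) (lt_irrefl _)
      simp only [pvKill]
      by_cases hxc : A.getD i 0 ≤ c
      · -- kill: cand1 = none, and running < x is impossible, so cand2 = none
        rw [if_pos hxc]
        have hnrx : ¬ running < A.getD i 0 := fun hr => hcrun (lt_of_lt_of_le hr hxc)
        rw [if_neg (by tauto)]
        refine ih (i + 1) (by omega) _ _ (by omega) hilt hrun' ?_ (by simp)
        intro _ k hkS
        have hk_lt : k < i + 1 := hkS.2.2.1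
        by_cases hki : k = i
        · subst hki
          exact hnrx ((hrun _).mpr hkS.2.2.2.1)
        · have hkSi := surv_weaken A i k hkS (by omega)
          have h1 := hmin k hkSi
          have h2 : A.getD k 0 < A.getD i 0 := hkS.2.2.2.2 i (by omega) (by omega)
          omega
      · -- alive: cand1 = some c, cand2 = some c
        rw [if_neg hxc]
        rw [if_neg (by simp)]
        refine ih (i + 1) (by omega) _ _ (by omega) hilt hrun' (by simp) ?_
        intro c' hc'
        have hcc : c' = c := by injection hc'; omega
        subst hcc
        constructor
        · refine ⟨k0, ⟨hk0S.1, hk0S.2.1, by omega, hk0S.2.2.2.1, ?_⟩, hk0v⟩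
          intro j hj hj'
          rcases Nat.lt_succ_iff_lt_or_eq.mp hj' with hji | hji
          · exact hk0S.2.2.2.2 j hj hji
          · subst hji; omega
        · intro k hkS
          have hk_lt : k < i + 1 := hkS.2.2.1
          by_cases hki : k = i
          · subst hki; omega
          · exact hmin k (surv_weaken A i k hkS (by omega))

-- invariant of A's left pass: entries below i are untouched, entries ≥ i satisfy the recurrence
lemma leftLoop_spec (A : List Int) (l : List Int) (i : Nat)
    (hlen : l.length = A.length) (hi : 1 ≤ i) :
    (∀ j, j < i → (pvLeftLoop A l i).getD j 0 = l.getD j 0) ∧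
    (∀ j, i ≤ j → j < A.length →
      (pvLeftLoop A l i).getD j 0 =
        max ((pvLeftLoop A l i).getD (j - 1) 0) (A.getD j 0)) := by
  induction h : A.length - i generalizing l i with
  | zero =>
    rw [pvLeftLoop]
    have : ¬ i < A.length := by omega
    refine ⟨fun j _ => by simp [if_neg this], fun j hj hj' => by omega⟩
  | succ k ih =>
    have hilt : i < A.length := by omega
    rw [pvLeftLoop]
    simp only [if_pos hilt]
    set l' := l.set i (max (l.getD (i - 1) 0) (A.getD i 0)) with hl'
    have hlen' : l'.length = A.length := by simp [hl', hlen]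
    obtain ⟨h1, h2⟩ := ih l' (i + 1) hlen' (by omega) (by omega)
    refine ⟨fun j hj => ?_, fun j hj hj' => ?_⟩
    · rw [h1 j (by omega)]
      simp [hl', List.getD, List.getElem?_set_ne (by omega : i ≠ j)]
    · rcases Nat.eq_or_lt_of_le hj with heq | hlt
      · rw [← heq, h1 i (by omega), h1 (i - 1) (by omega)]
        simp only [hl', List.getD]
        rw [List.getElem?_set_self (by omega), List.getElem?_set_ne (by omega : i ≠ i - 1)]
        simp
      · exact h2 j (by omega) hj'

-- invariant of A's right pass: entries ≥ k are untouched, entries < k satisfy the recurrence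
lemma rightLoop_spec (A : List Int) :
    ∀ (k : Nat) (r : List Int), r.length = A.length → k ≤ A.length →
    (∀ j, k ≤ j → (pvRightLoopA A r k).getD j 0 = r.getD j 0) ∧
    (∀ j, j < k → (pvRightLoopA A r k).getD j 0 =
        min ((pvRightLoopA A r k).getD (j + 1) 0) (A.getD j 0)) := by
  intro k
  induction k with
  | zero => intro r hlen hk; exact ⟨fun j _ => rfl, fun j hj => by omega⟩
  | succ k ih =>
    intro r hlen hk
    rw [pvRightLoopA]
    set r' := r.set k (min (r.getD (k + 1) 0) (A.getD k 0)) with hr'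
    have hlen' : r'.length = A.length := by simp [hr', hlen]
    obtain ⟨h1, h2⟩ := ih r' hlen' (by omega)
    refine ⟨fun j hj => ?_, fun j hj => ?_⟩
    · rw [h1 j (by omega)]
      simp [hr', List.getD, List.getElem?_set_ne (show k ≠ j by omega)]
    · rcases Nat.lt_succ_iff_lt_or_eq.mp hj with hjk | hjk
      · exact h2 j hjk
      · subst hjk
        rw [h1 j (le_refl _), h1 (j + 1) (by omega)]
        simp only [hr', List.getD]
        rw [List.getElem?_set_self (by omega), List.getElem?_set_ne (show j ≠ j + 1 by omega)]
        simp

-- a list satisfying the prefix-max recurrence characterises "greater than the whole prefix"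
lemma pref_iff (A l : List Int)
    (h0 : l.getD 0 0 = A.getD 0 0)
    (hrec : ∀ j, 1 ≤ j → j < A.length → l.getD j 0 = max (l.getD (j - 1) 0) (A.getD j 0)) :
    ∀ k, k < A.length → ∀ x, (l.getD k 0 < x ↔ ∀ j, j ≤ k → A.getD j 0 < x) := by
  intro k
  induction k with
  | zero =>
    intro hk x
    rw [h0]
    constructor
    · intro h j hj
      have hj0 : j = 0 := by omega
      exact hj0 ▸ h
    · intro h; exact h 0 (le_refl _)
  | succ k ih =>
    intro hk x
    have hr := hrec (k + 1) (by omega) hk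
    rw [Nat.add_sub_cancel] at hr
    rw [hr, max_lt_iff, ih (by omega)]
    constructor
    · rintro ⟨hall, hx⟩ j hj
      by_cases hjk : j ≤ k
      · exact hall j hjk
      · have hj1 : j = k + 1 := by omega
        exact hj1 ▸ hx
    · intro hall
      exact ⟨fun j hj => hall j (by omega), hall (k + 1) (le_refl _)⟩

-- a list satisfying the suffix-min recurrence characterises "less than the whole suffix"
lemma suf_iff (A r : List Int)
    (hlast : r.getD (A.length - 1) 0 = A.getD (A.length - 1) 0)
    (hrec : ∀ j, j + 1 < A.length → r.getD j 0 = min (r.getD (j + 1) 0) (A.getD j 0)) :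
    ∀ k, k < A.length → ∀ x, (x < r.getD k 0 ↔ ∀ j, k ≤ j → j < A.length → x < A.getD j 0) := by
  intro k
  induction hd : A.length - 1 - k generalizing k with
  | zero =>
    intro hk x
    have hkl : k = A.length - 1 := by omega
    subst hkl
    rw [hlast]
    constructor
    · intro h j hj hj'
      have hje : j = A.length - 1 := by omega
      exact hje ▸ h
    · intro h; exact h _ (le_refl _) (by omega)
  | succ m ih =>
    intro hk x
    rw [hrec k (by omega), lt_min_iff, ih (k + 1) (by omega) (by omega)]
    constructor
    · rintro ⟨h1, h2⟩ j hj hj'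
      by_cases hjk : j = k
      · exact hjk ▸ h2
      · exact h1 j (by omega) hj'
    · intro h
      exact ⟨fun j hj hj' => h j (by omega) hj', h k (le_refl _) hk⟩

-- A's final scan finds exactly the surviving interior indices ≥ i
lemma scanA_iff (A left right : List Int)
    (hL : ∀ k, 1 ≤ k → k < A.length →
        ∀ x, (left.getD (k - 1) 0 < x ↔ ∀ j, j < k → A.getD j 0 < x))
    (hR : ∀ k, k + 1 < A.length →
        ∀ x, (x < right.getD (k + 1) 0 ↔ ∀ j, k < j → j < A.length → x < A.getD j 0)) :
    ∀ i, 1 ≤ i →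
      ((pvScanA A left right i = 1 ↔ ∃ k, i ≤ k ∧ pvSurv A A.length k) ∧
       (pvScanA A left right i = 0 ∨ pvScanA A left right i = 1)) := by
  intro i
  induction hd : A.length - 1 - i generalizing i with
  | zero =>
    intro h1
    rw [pvScanA]
    have hno : ¬ i < A.length - 1 := by omega
    rw [if_neg hno]
    refine ⟨⟨fun h => absurd h (by decide), ?_⟩, Or.inl rfl⟩
    rintro ⟨k, hik, hkS⟩
    have := hkS.2.1
    omega
  | succ m ih =>
    intro h1
    rw [pvScanA]
    have hilt : i < A.length - 1 := by omega
    simp only [if_pos hilt]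
    by_cases hc : A.getD i 0 > left.getD (i - 1) 0 ∧ A.getD i 0 < right.getD (i + 1) 0
    · rw [if_pos hc]
      refine ⟨⟨fun _ => ⟨i, le_refl _, ?_⟩, fun _ => rfl⟩, Or.inr rfl⟩
      exact ⟨by omega, by omega, by omega,
        (hL i h1 (by omega) _).mp hc.1,
        fun j hj hj' => (hR i (by omega) _).mp hc.2 j hj hj'⟩
    · rw [if_neg hc]
      obtain ⟨ih1, ih2⟩ := ih (i + 1) (by omega) (by omega)
      refine ⟨?_, ih2⟩
      rw [ih1]
      constructor
      · rintro ⟨k, hik, hkS⟩; exact ⟨k, by omega, hkS⟩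
      · rintro ⟨k, hik, hkS⟩
        by_cases hki : k = i
        · subst hki
          exact absurd ⟨(hL k h1 (by omega) _).mpr hkS.2.2.2.1,
            (hR k (by have := hkS.2.1; omega) _).mpr
              (fun j hj hj' => hkS.2.2.2.2 j hj hj')⟩ hc
        · exact ⟨k, by omega, hkS⟩

-- ===== VERDICT =====
theorem perfectPeak_spec : Claim_equal_perfectPeak := by
  intro A _ hpre
  show perfectPeak A = perfectPeak_alt A
  have hn : 1 ≤ A.length := by
    cases A with
    | nil => exact absurd rfl hpre
    | cons a t => simp
  have hAeq : perfectPeak A =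
      pvScanA A (pvLeftLoop A ((List.replicate A.length 0).set 0 (A.getD 0 0)) 1)
        (pvRightLoopA A ((List.replicate A.length 0).set (A.length - 1) (A.getD (A.length - 1) 0))
          (A.length - 1)) 1 := rfl
  rw [hAeq]
  -- left array facts
  obtain ⟨hA1, hA2⟩ := leftLoop_spec A
    ((List.replicate A.length 0).set 0 (A.getD 0 0)) 1 (by simp) (le_refl 1)
  have h0 : (pvLeftLoop A ((List.replicate A.length 0).set 0 (A.getD 0 0)) 1).getD 0 0
      = A.getD 0 0 := by
    rw [hA1 0 (by omega)]
    simp only [List.getD]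
    rw [List.getElem?_set_self (by simp only [List.length_replicate]; omega)]
    simp
  have hLpref := pref_iff A _ h0 (fun j hj hj' => hA2 j hj hj')
  have hL : ∀ k, 1 ≤ k → k < A.length → ∀ x,
      ((pvLeftLoop A ((List.replicate A.length 0).set 0 (A.getD 0 0)) 1).getD (k - 1) 0 < x ↔
        ∀ j, j < k → A.getD j 0 < x) := by
    intro k hk hk' x
    rw [hLpref (k - 1) (by omega)]
    constructor
    · intro h j hj; exact h j (by omega)
    · intro h j hj; exact h j (by omega)
  -- right array facts
  obtain ⟨hB1, hB2⟩ := rightLoop_spec A (A.length - 1)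
    ((List.replicate A.length 0).set (A.length - 1) (A.getD (A.length - 1) 0))
    (by simp) (by omega)
  have hlast : (pvRightLoopA A
      ((List.replicate A.length 0).set (A.length - 1) (A.getD (A.length - 1) 0))
      (A.length - 1)).getD (A.length - 1) 0 = A.getD (A.length - 1) 0 := by
    rw [hB1 (A.length - 1) (le_refl _)]
    simp only [List.getD]
    rw [List.getElem?_set_self (by simp only [List.length_replicate]; omega)]
    simp
  have hRsuf := suf_iff A _ hlast (fun j hj => hB2 j (by omega))
  have hR : ∀ k, k + 1 < A.length → ∀ x,
      (x < (pvRightLoopA A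
        ((List.replicate A.length 0).set (A.length - 1) (A.getD (A.length - 1) 0))
        (A.length - 1)).getD (k + 1) 0 ↔
        ∀ j, k < j → j < A.length → x < A.getD j 0) := by
    intro k hk x
    rw [hRsuf (k + 1) (by omega)]
    constructor
    · intro h j hj hj'; exact h j (by omega) hj'
    · intro h j hj hj'; exact h j (by omega) hj'
  obtain ⟨hiffA, hvalA⟩ := scanA_iff A _ _ hL hR 1 (le_refl 1)
  -- B-side characterisation
  have hBmain := loopB_iff A 1 (A.getD 0 0) none (le_refl 1) hn
    (by
      intro x
      constructor
      · intro h j hj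
        have hj0 : j = 0 := by omega
        exact hj0 ▸ h
      · intro h; exact h 0 (by omega))
    (fun _ k hkS => by have := hkS.1; have := hkS.2.2.1; omega)
    (fun c hc => by cases hc)
  have hEx : (∃ k, 1 ≤ k ∧ pvSurv A A.length k) ↔ ∃ k, pvSurv A A.length k :=
    ⟨fun ⟨k, _, h⟩ => ⟨k, h⟩, fun ⟨k, h⟩ => ⟨k, h.1, h⟩⟩
  unfold perfectPeak_alt
  rcases hcase : pvLoopB A (A.getD 0 0) none 1 with _ | c
  · have hnot : ¬ ∃ k, pvSurv A A.length k := by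
      rw [← hBmain, hcase]; simp
    rcases hvalA with h0' | h1'
    · rw [h0']
    · exact absurd (hEx.mp (hiffA.mp h1')) hnot
  · have hex : ∃ k, pvSurv A A.length k := hBmain.mp (by rw [hcase]; rfl)
    rw [hiffA.mpr (hEx.mpr hex)]
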